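-- pv_equiv track=rewrite | github.com/AkhilGurrapu/CrawlAI | streamlit_app.py | search_relevant_content
-- ===== SOURCE A (Python) =====
-- def search_relevant_content(query, content_store, max_results=5):
--     results = []
--     for url, page_data in content_store.items():
--         content = page_data["content"]
--         title = page_data["title"]
--
--         # Simple keyword matching
--         query_terms = query.lower().split()
--         relevance = sum(1 for term in query_terms if term in content.lower())
--
--         if relevance > 0:
--             results.append((url, title, content, relevance))
--
--     results.sort(key=lambda x: x[3], reverse=True)
--     return results[:max_results]
-- ===== SOURCE B (Python) =====
-- def search_relevant_content(query, content_store, max_results=5):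
--     terms = query.lower().split()
--     scored = [(url, pd["title"], pd["content"],
--                sum(1 for t in terms if t in pd["content"].lower()))
--               for url, pd in content_store.items()]
--     out = []
--     for r in range(len(terms), 0, -1):
--         out.extend(e for e in scored if e[3] == r)
--     return out[:max_results]
-- ===== Notes on version B (the rewrite author's own statement) =====
-- stated objective: alternative
-- what changed: B replaces A's filter-then-stable-sort with a distribution (bucket) pass: it scores every page once, then sweeps relevance levels from len(terms) down to 1, emitting each level's pages in insertion order, which reproduces the stable descending sort without sorting; pages with relevance 0 are dropped because the sweep stops at 1.
import Mathlib
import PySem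

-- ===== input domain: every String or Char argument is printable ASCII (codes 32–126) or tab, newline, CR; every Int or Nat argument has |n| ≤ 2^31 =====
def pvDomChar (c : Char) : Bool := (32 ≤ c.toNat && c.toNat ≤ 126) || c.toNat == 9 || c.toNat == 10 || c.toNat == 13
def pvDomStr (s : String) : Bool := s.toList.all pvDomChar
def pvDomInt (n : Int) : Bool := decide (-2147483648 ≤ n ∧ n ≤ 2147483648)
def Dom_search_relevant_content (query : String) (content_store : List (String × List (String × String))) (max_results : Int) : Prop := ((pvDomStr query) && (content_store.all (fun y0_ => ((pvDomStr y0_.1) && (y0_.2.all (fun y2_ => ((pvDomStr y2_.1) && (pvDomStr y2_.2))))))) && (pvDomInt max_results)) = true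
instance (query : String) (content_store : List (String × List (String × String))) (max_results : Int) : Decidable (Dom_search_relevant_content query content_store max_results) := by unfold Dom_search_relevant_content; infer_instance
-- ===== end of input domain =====

-- ===== PORT A =====
-- B replaces A's filter-then-stable-sort with a descending bucket sweep over relevance levels (objective: alternative, not measured faster).
-- page_data["content"]/["title"] raise KeyError on a missing key; Pre_ excludes those stores, getD "" is the total form used under Pre_.
def search_relevant_content (query : String) (content_store : List (String × List (String × String))) (max_results : Int) : List (String × String × String × Int) :=
  let results := content_store.foldl (fun results p =>
    let content := ((PySem.Dict.mk p.2).get? "content").getD ""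
    let title := ((PySem.Dict.mk p.2).get? "title").getD ""
    let query_terms := PySem.Str.split₀ (PySem.Str.lower query)
    -- sum(1 for term in query_terms if term in content.lower()) = count of passing terms
    let relevance : Int := query_terms.countP (fun term => PySem.Str.isIn term (PySem.Str.lower content))
    if relevance > 0 then results ++ [(p.1, title, content, relevance)] else results) []
  PySem.List.slice (PySem.List.sorted results (fun x => x.2.2.2) true) none (some max_results)

-- ===== PORT B =====
-- the scoring comprehension of Source B: one (url, title, content, relevance) tuple per page, relevance may be 0
def pvScore (terms : List String) (p : String × List (String × String)) : String × String × String × Int :=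
  (p.1, ((PySem.Dict.mk p.2).get? "title").getD "",
   ((PySem.Dict.mk p.2).get? "content").getD "",
   (terms.countP (fun t =>
      PySem.Str.isIn t (PySem.Str.lower (((PySem.Dict.mk p.2).get? "content").getD ""))) : Int))

-- Source B: score every page once, then sweep r = len(terms), …, 1 emitting each level's pages in order
def search_relevant_content_alt (query : String) (content_store : List (String × List (String × String))) (max_results : Int) : List (String × String × String × Int) :=
  let terms := PySem.Str.split₀ (PySem.Str.lower query)
  let scored := content_store.map (pvScore terms)
  let out := (PySem.List.pyRange (terms.length : Int) 0 (-1)).foldl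
      (fun out r => out ++ scored.filter (fun e => e.2.2.2 == r)) []
  PySem.List.slice out none (some max_results)

-- ===== PRECONDITION & SPEC =====
-- Pre_ excludes exactly the stores where some page dict lacks the "content" or "title" key: there Python A raises KeyError.
def Pre_search_relevant_content (query : String) (content_store : List (String × List (String × String))) (max_results : Int) : Prop :=
  ∀ p ∈ content_store, (PySem.Dict.mk p.2).contains "content" = true ∧ (PySem.Dict.mk p.2).contains "title" = true
instance (query : String) (content_store : List (String × List (String × String))) (max_results : Int) : Decidable (Pre_search_relevant_content query content_store max_results) := by unfold Pre_search_relevant_content; infer_instance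

def pvWitness_search_relevant_content : String × (List (String × List (String × String))) × Int :=
  ("hello world", [("u1", [("content", "say hello"), ("title", "t1")]), ("u2", [("content", "world hello"), ("title", "t2")])], 5)

def Spec_search_relevant_content (query : String) (content_store : List (String × List (String × String))) (max_results : Int) (out : List (String × String × String × Int)) : Prop := out = search_relevant_content_alt query content_store max_results
instance (query : String) (content_store : List (String × List (String × String))) (max_results : Int) (out : List (String × String × String × Int)) : Decidable (Spec_search_relevant_content query content_store max_results out) := by unfold Spec_search_relevant_content; infer_instance

-- ===== CLAIM (what is proved, stated in full; the proofs are below) =====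
def Claim_equal_search_relevant_content : Prop := ∀ (query : String) (content_store : List (String × List (String × String))) (max_results : Int), Dom_search_relevant_content query content_store max_results → Pre_search_relevant_content query content_store max_results → Spec_search_relevant_content query content_store max_results (search_relevant_content query content_store max_results)

-- ===== LEMMAS AND PROOFS =====

def pvDesc : Nat → List Int
  | 0 => []
  | n + 1 => ((n + 1 : Nat) : Int) :: pvDesc n

theorem pv_map_range_desc (n : Nat) : (List.range n).map (fun (k : Nat) => ((n : Int) + (-1) * (k : Int))) = pvDesc n := by
  induction n with
  | zero => rfl
  | succ m ih =>
    rw [List.range_succ_eq_map, List.map_cons, List.map_map]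
    simp only [Function.comp_def]
    rw [show (fun k : Nat => ((m+1 : Nat) : Int) + (-1) * ((k+1 : Nat) : Int)) = (fun k : Nat => ((m : Int) + (-1) * (k : Int))) from by funext k; push_cast; ring]
    simp only [neg_one_mul] at ih
    simp [pvDesc, ih]

theorem pv_pyRange_desc (n : Nat) : PySem.List.pyRange (n : Int) 0 (-1) = pvDesc n := by
  rcases Nat.eq_zero_or_pos n with h | h
  · subst h; rfl
  · have h1 : ((0:Int) < (n:Int)) := by exact_mod_cast h
    have h2 : (((n:Int) - 0 + - -1 - 1) / - -1).toNat = n := by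
      simp only [neg_neg, Int.ediv_one]; omega
    simp only [PySem.List.pyRange]
    rw [if_neg (by norm_num), if_neg (by norm_num), if_pos h1]
    rw [h2, pv_map_range_desc]

theorem pvInsert_skip {α : Type} (bef : α → α → Bool) (x : α) (as bs : List α)
    (h : ∀ a ∈ as, bef x a = false) :
    PySem.List.insertBy bef x (as ++ bs) = as ++ PySem.List.insertBy bef x bs := by
  induction as with
  | nil => rfl
  | cons a as ih =>
    simp only [List.cons_append, PySem.List.insertBy, h a (by simp)]
    simp [ih (fun a ha => h a (by simp [ha]))]

theorem pvInsert_front {α : Type} (bef : α → α → Bool) (x : α) (bs : List α)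
    (h : ∀ y ∈ bs, bef x y = true) :
    PySem.List.insertBy bef x bs = x :: bs := by
  cases bs with
  | nil => rfl
  | cons y ys => simp [PySem.List.insertBy, h y (by simp)]

def pvBuckets (key : (String × String × String × Int) → Int) (n : Nat)
    (P : List (String × String × String × Int)) : List (String × String × String × Int) :=
  (pvDesc n).flatMap (fun r => P.filter (fun e => key e == r))

theorem pvDesc_mem (n : Nat) (r : Int) : r ∈ pvDesc n ↔ 1 ≤ r ∧ r ≤ (n : Int) := by
  induction n with
  | zero => simp [pvDesc]; omega
  | succ m ih => simp [pvDesc, ih]; omega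

theorem pvBuckets_key_le (key : (String × String × String × Int) → Int) (n : Nat)
    (P : List (String × String × String × Int)) :
    ∀ y ∈ pvBuckets key n P, key y ≤ (n : Int) := by
  intro y hy
  simp only [pvBuckets, List.mem_flatMap, List.mem_filter, beq_iff_eq] at hy
  obtain ⟨r, hr, _, hk⟩ := hy
  have := (pvDesc_mem n r).1 hr
  omega

theorem pvBuckets_notin (key : (String × String × String × Int) → Int) (n : Nat)
    (P : List (String × String × String × Int)) (x : String × String × String × Int)
    (hk : ¬(1 ≤ key x ∧ key x ≤ (n : Int))) :
    pvBuckets key n (P ++ [x]) = pvBuckets key n P := by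
  unfold pvBuckets
  apply List.flatMap_congr
  intro r hr
  have h1 := (pvDesc_mem n r).1 hr
  rw [List.filter_append]
  have : List.filter (fun e => key e == r) [x] = [] := by
    have hne : (key x == r) = false := by simp; omega
    simp [hne]
  simp [this]

theorem pvBuckets_snoc (key : (String × String × String × Int) → Int) (n : Nat)
    (P : List (String × String × String × Int)) (x : String × String × String × Int)
    (h1 : 1 ≤ key x) (h2 : key x ≤ (n : Int)) :
    PySem.List.insertBy (fun a b => decide (key b < key a)) x (pvBuckets key n P)
      = pvBuckets key n (P ++ [x]) := by
  induction n with
  | zero => exfalso; simp at h2; omega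
  | succ m ih =>
    have hhead : pvBuckets key (m+1) P
        = P.filter (fun e => key e == ((m+1 : Nat) : Int)) ++ pvBuckets key m P := by
      simp [pvBuckets, pvDesc]
    have hskip : ∀ a ∈ P.filter (fun e => key e == ((m+1 : Nat) : Int)),
        (fun a b => decide (key b < key a)) x a = false := by
      intro a ha
      simp only [List.mem_filter, beq_iff_eq] at ha
      simp only [decide_eq_false_iff_not, not_lt]
      push_cast at *
      omega
    rw [hhead, pvInsert_skip _ _ _ _ hskip]
    have hheadx : (P ++ [x]).filter (fun e => key e == ((m+1 : Nat) : Int))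
        = P.filter (fun e => key e == ((m+1 : Nat) : Int))
          ++ List.filter (fun e => key e == ((m+1 : Nat) : Int)) [x] := List.filter_append ..
    by_cases hc : key x ≤ (m : Int)
    · rw [ih hc]
      have : List.filter (fun e => key e == ((m+1 : Nat) : Int)) [x] = [] := by
        have hne : (key x == ((m : Int) + 1)) = false := by simp; omega
        simp [hne]
      simp [pvBuckets, pvDesc]
      omega
    · have hx : key x = ((m+1 : Nat) : Int) := by push_cast at *; omega
      rw [pvInsert_front _ _ _ (by
        intro y hy
        have := pvBuckets_key_le key m P y hy
        simp only [decide_eq_true_eq]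
        omega)]
      have hfx : List.filter (fun e => key e == ((m+1 : Nat) : Int)) [x] = [x] := by
        simp [hx]
      rw [show pvBuckets key (m+1) (P ++ [x])
          = (P ++ [x]).filter (fun e => key e == ((m+1 : Nat) : Int)) ++ pvBuckets key m (P ++ [x]) from by
        simp [pvBuckets, pvDesc]]
      rw [hheadx, hfx, pvBuckets_notin key m P x (by omega)]
      simp

theorem pv_fold_buckets (key : (String × String × String × Int) → Int) (n : Nat)
    (L P : List (String × String × String × Int))
    (h : ∀ e ∈ L, 1 ≤ key e ∧ key e ≤ (n : Int)) :
    L.foldl (fun acc x => PySem.List.insertBy (fun a b => decide (key b < key a)) x acc)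
        (pvBuckets key n P)
      = pvBuckets key n (P ++ L) := by
  induction L generalizing P with
  | nil => simp
  | cons x L ih =>
    have hx := h x (by simp)
    rw [List.foldl_cons, pvBuckets_snoc key n P x hx.1 hx.2,
        ih (P ++ [x]) (fun e he => h e (by simp [he]))]
    simp

theorem pv_sorted_eq_buckets (key : (String × String × String × Int) → Int) (n : Nat)
    (L : List (String × String × String × Int))
    (h : ∀ e ∈ L, 1 ≤ key e ∧ key e ≤ (n : Int)) :
    PySem.List.sorted L key true = pvBuckets key n L := by
  rw [PySem.List.sorted_rev_eq_foldl_insertBy]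
  have h0 : pvBuckets key n [] = [] := by simp [pvBuckets]
  calc L.foldl (fun acc x => PySem.List.insertBy (fun a b => decide (key b < key a)) x acc) []
      = L.foldl (fun acc x => PySem.List.insertBy (fun a b => decide (key b < key a)) x acc)
        (pvBuckets key n []) := by rw [h0]
    _ = pvBuckets key n ([] ++ L) := pv_fold_buckets key n L [] h
    _ = pvBuckets key n L := by simp

set_option maxHeartbeats 1000000 in

set_option maxHeartbeats 1000000 in
theorem pv_main (query : String) (content_store : List (String × List (String × String))) (max_results : Int) :
    search_relevant_content query content_store max_results
      = search_relevant_content_alt query content_store max_results := by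
  unfold search_relevant_content search_relevant_content_alt
  simp only []
  set terms := PySem.Str.split₀ (PySem.Str.lower query) with hterms
  set scored := content_store.map (pvScore terms) with hscored
  -- A's loop body, with its lets inlined, is the append-if of pvScore
  have hfun : (fun (results : List (String × String × String × Int)) (p : String × List (String × String)) =>
      let content := ((PySem.Dict.mk p.2).get? "content").getD ""
      let title := ((PySem.Dict.mk p.2).get? "title").getD ""
      let query_terms := PySem.Str.split₀ (PySem.Str.lower query)
      let relevance : Int := query_terms.countP (fun term => PySem.Str.isIn term (PySem.Str.lower content))
      if relevance > 0 then results ++ [(p.1, title, content, relevance)] else results)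
      = (fun results p => if (decide (0 < (pvScore terms p).2.2.2)) = true then results ++ [pvScore terms p] else results) := by
    funext rs p
    by_cases h : (0 : Int) < (pvScore terms p).2.2.2
    · simp [pvScore, hterms]
    · simp [pvScore, hterms]
  rw [hfun, PySem.List.foldl_append_if, List.nil_append]
  have hres : List.map (pvScore terms)
        (List.filter (fun p => decide (0 < (pvScore terms p).2.2.2)) content_store)
      = scored.filter (fun e => decide (0 < e.2.2.2)) := by
    rw [hscored, List.filter_map]
    simp [Function.comp_def]
  rw [hres]
  rw [pv_pyRange_desc terms.length]
  rw [PySem.List.foldl_append_eq_flatMap, List.nil_append]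
  have hbound : ∀ e ∈ scored.filter (fun e => decide (0 < e.2.2.2)),
      1 ≤ e.2.2.2 ∧ e.2.2.2 ≤ (terms.length : Int) := by
    intro e he
    simp only [List.mem_filter, decide_eq_true_eq] at he
    obtain ⟨hm, hpos⟩ := he
    rw [hscored] at hm
    obtain ⟨p, _, rfl⟩ := List.mem_map.1 hm
    refine ⟨by omega, ?_⟩
    simp only [pvScore]
    exact_mod_cast List.countP_le_length
  rw [pv_sorted_eq_buckets (fun x => x.2.2.2) terms.length _ hbound]
  have hlists : pvBuckets (fun x => x.2.2.2) terms.length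
        (scored.filter (fun e => decide (0 < e.2.2.2)))
      = (pvDesc terms.length).flatMap (fun r => scored.filter (fun e => e.2.2.2 == r)) := by
    unfold pvBuckets
    apply List.flatMap_congr
    intro r hr
    have hr1 := (pvDesc_mem terms.length r).1 hr
    rw [List.filter_filter]
    apply List.filter_congr
    intro e _
    by_cases h : e.2.2.2 = r
    · simp [h]; omega
    · simp [h]
  rw [hlists]

-- ===== VERDICT (by name: the statement is the Claim_ definition above) =====
theorem search_relevant_content_spec : Claim_equal_search_relevant_content := by
  intro query content_store max_results _ _
  unfold Spec_search_relevant_content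
  exact pv_main query content_store max_results
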